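-- pv_equiv track=rewrite | github.com/anjankow/lab-results-extractor | extract_column_data.py | separate_numbers_into_buckets
-- ===== SOURCE A (Python) =====
-- from typing import Dict, List
--
-- def separate_numbers_into_buckets(numbers: List[int], max_deviation=5):
--     buckets = {}
--
--     # Sort the numbers in ascending order
--     sorted_numbers = sorted(numbers)
--
--     # Assign numbers to buckets
--     for number in sorted_numbers:
--         assigned = False
--         for bucket_name, bucket_values in buckets.items():
--             # Check if the number is within the range of the bucket value
--             if abs(number - bucket_values[0]) <= max_deviation:
--                 buckets[bucket_name].append(number)
--                 assigned = True
--                 break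
--         if not assigned:
--             # Create a new bucket for the number
--             buckets[len(buckets)] = [number]
--
--     return buckets
-- ===== SOURCE B (Python) =====
-- def separate_numbers_into_buckets(numbers, max_deviation=5):
--     # Sorted input means each number can only ever join the most recent bucket:
--     # any earlier bucket's representative is already more than max_deviation away.
--     buckets = []
--     for n in sorted(numbers):
--         if buckets and n - buckets[-1][0] <= max_deviation:
--             buckets[-1].append(n)
--         else:
--             buckets.append([n])
--     return dict(enumerate(buckets))
-- ===== Notes on version B (the rewrite author's own statement) =====
-- stated objective: faster
-- what changed: A scans all existing buckets for each (sorted) number; B notes that in sorted order only the most recently created bucket can ever be within range, so it compares each number against the last bucket only, removing the inner scan.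
import Mathlib
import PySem

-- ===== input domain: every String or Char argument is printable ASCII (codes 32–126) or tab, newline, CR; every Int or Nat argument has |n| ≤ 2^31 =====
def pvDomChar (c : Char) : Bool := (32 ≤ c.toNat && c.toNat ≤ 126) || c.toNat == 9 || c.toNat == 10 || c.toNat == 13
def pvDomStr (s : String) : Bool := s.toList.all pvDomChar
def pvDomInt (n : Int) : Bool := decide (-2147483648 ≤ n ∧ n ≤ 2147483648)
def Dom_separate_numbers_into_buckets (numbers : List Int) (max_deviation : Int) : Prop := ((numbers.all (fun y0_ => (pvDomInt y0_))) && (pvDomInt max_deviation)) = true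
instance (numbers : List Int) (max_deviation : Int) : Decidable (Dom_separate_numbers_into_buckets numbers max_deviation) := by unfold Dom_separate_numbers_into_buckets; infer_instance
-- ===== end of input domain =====

-- B replaces A's inner scan over all existing buckets by a single comparison with the
-- most recent bucket (sorted order makes earlier buckets unreachable): O(n·k) → O(n log n).

-- ===== PORT A =====
-- bucket_values[0]: Python indexing; buckets are always created nonempty, where this equals headI
def pvHead (l : List Int) : Int := (PySem.List.pyGet? l 0).getD 0

-- the inner `for bucket_name, bucket_values in buckets.items(): … break` loop
def aAssign (number d : Int) : List (Int × List Int) → Option (List (Int × List Int))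
  | [] => none
  | (k, v) :: rest =>
    if |number - pvHead v| ≤ d then some ((k, v ++ [number]) :: rest)
    else (aAssign number d rest).map (fun t => (k, v) :: t)

-- one iteration of the outer loop: assign, or create bucket keyed by len(buckets)
def aStep (d : Int) (buckets : List (Int × List Int)) (number : Int) : List (Int × List Int) :=
  match aAssign number d buckets with
  | some b => b
  | none => buckets ++ [(((buckets.length : Int)), [number])]

def separate_numbers_into_buckets (numbers : List Int) (max_deviation : Int) : List (Int × List Int) :=
  (PySem.List.sorted numbers (fun x => x) false).foldl (aStep max_deviation) []

-- ===== PORT B =====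
-- buckets[-1].append(n): append n to the last bucket of the list
def bAppendLast : List (List Int) → Int → List (List Int)
  | [], _ => []
  | [b], n => [b ++ [n]]
  | b :: c :: rest, n => b :: bAppendLast (c :: rest) n

-- one iteration of B's loop: `if buckets and n - buckets[-1][0] <= max_deviation`
def bStep (d : Int) (acc : List (List Int)) (n : Int) : List (List Int) :=
  match acc with
  | [] => [[n]]
  | b :: rest =>
    if n - ((b :: rest).getLastD []).headI ≤ d then bAppendLast (b :: rest) n
    else (b :: rest) ++ [[n]]

def separate_numbers_into_buckets_alt (numbers : List Int) (max_deviation : Int) : List (Int × List Int) :=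
  PySem.List.enumerate ((PySem.List.sorted numbers (fun x => x) false).foldl (bStep max_deviation) []) 0

-- ===== PRECONDITION & SPEC =====
def Spec_separate_numbers_into_buckets (numbers : List Int) (max_deviation : Int) (out : List (Int × List Int)) : Prop := out = separate_numbers_into_buckets_alt numbers max_deviation
instance (numbers : List Int) (max_deviation : Int) (out : List (Int × List Int)) : Decidable (Spec_separate_numbers_into_buckets numbers max_deviation out) := by unfold Spec_separate_numbers_into_buckets; infer_instance

-- ===== CLAIM (what is proved, stated in full; the proofs are below) =====
def Claim_equal_separate_numbers_into_buckets : Prop := ∀ (numbers : List Int) (max_deviation : Int), Dom_separate_numbers_into_buckets numbers max_deviation → Spec_separate_numbers_into_buckets numbers max_deviation (separate_numbers_into_buckets numbers max_deviation)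

-- ===== LEMMAS AND PROOFS =====

lemma pvHead_eq (l : List Int) : pvHead l = l.headI := by
  cases l <;> simp [pvHead, PySem.List.pyGet?, PySem.List.pyIdx?]

lemma mem_bAppendLast {b' : List Int} {n : Int} : ∀ {bs : List (List Int)},
    b' ∈ bAppendLast bs n → b' ∈ bs ∨ ∃ b ∈ bs, b' = b ++ [n]
  | [], h => by simp [bAppendLast] at h
  | [b], h => by
      simp [bAppendLast] at h
      exact Or.inr ⟨b, by simp, h⟩
  | b :: c :: rest, h => by
      simp only [bAppendLast, List.mem_cons] at h
      rcases h with h | h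
      · exact Or.inl (by simp [h])
      · rcases mem_bAppendLast h with h' | ⟨x, hx, he⟩
        · exact Or.inl (List.mem_cons_of_mem _ h')
        · exact Or.inr ⟨x, List.mem_cons_of_mem _ hx, he⟩

lemma reps_bAppendLast {n : Int} : ∀ {bs : List (List Int)},
    (∀ b ∈ bs, b ≠ []) → (bAppendLast bs n).map List.headI = bs.map List.headI
  | [], _ => rfl
  | [b], h => by
      have hb : b ≠ [] := h b (by simp)
      cases b with
      | nil => exact absurd rfl hb
      | cons x xs => simp [bAppendLast]
  | b :: c :: rest, h => by
      simp only [bAppendLast, List.map_cons]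
      rw [reps_bAppendLast (fun x hx => h x (List.mem_cons_of_mem _ hx))]
      simp

lemma getLast_reps : ∀ (bs : List (List Int)) (h : bs.map List.headI ≠ []),
    (bs.map List.headI).getLast h = (bs.getLastD []).headI
  | [], h => absurd rfl h
  | [b], _ => by simp
  | b :: c :: rest, _ => by
      simp only [List.map_cons]
      rw [List.getLast_cons (by simp)]
      have h := getLast_reps (c :: rest) (by simp)
      simp only [List.map_cons] at h
      rw [h]
      simp

lemma assign_eq (d n : Int) : ∀ (i : Int) (bs : List (List Int)),
    (∀ r ∈ (bs.map List.headI).dropLast, r + d < n) →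
    (∀ r ∈ bs.map List.headI, r ≤ n) →
    aAssign n d (PySem.List.enumerate bs i) =
      if bs ≠ [] ∧ n - (bs.getLastD []).headI ≤ d
      then some (PySem.List.enumerate (bAppendLast bs n) i) else none
  | i, [] => by intro _ _; simp [PySem.List.enumerate_nil, aAssign]
  | i, [b] => by
      intro _ h3
      have hr : b.headI ≤ n := h3 _ (by simp)
      simp only [PySem.List.enumerate_cons, PySem.List.enumerate_nil, aAssign, pvHead_eq]
      rw [abs_of_nonneg (by omega)]
      by_cases hc : n - b.headI ≤ d
      · simp [hc, bAppendLast, PySem.List.enumerate_cons, PySem.List.enumerate_nil]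
      · simp [hc]
  | i, b :: c :: rest => by
      intro h2 h3
      have hfirst : b.headI + d < n := h2 _ (by simp)
      have hb3 : b.headI ≤ n := h3 _ (by simp)
      have habs : ¬ (|n - b.headI| ≤ d) := by
        rw [abs_of_nonneg (by omega)]; omega
      rw [PySem.List.enumerate_cons]
      simp only [aAssign, pvHead_eq]
      rw [if_neg habs]
      have ih := assign_eq d n (i + 1) (c :: rest)
        (fun r hr => h2 r (by
          simp only [List.map_cons, List.dropLast_cons₂, List.mem_cons] at hr ⊢
          exact Or.inr hr))
        (fun r hr => h3 r (by simp only [List.map_cons, List.mem_cons] at hr ⊢; exact Or.inr hr))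
      rw [ih]
      have hgl : ((b :: c :: rest).getLastD []).headI = ((c :: rest).getLastD []).headI := by
        simp
      by_cases hc : n - ((c :: rest).getLastD []).headI ≤ d
      · rw [if_pos ⟨by simp, hc⟩, if_pos ⟨by simp, by rw [hgl]; exact hc⟩]
        simp [bAppendLast, PySem.List.enumerate_cons]
      · rw [if_neg (fun h => hc h.2), if_neg (fun h => hc (by rw [← hgl]; exact h.2))]
        rfl

lemma step_eq (d n : Int) (bs : List (List Int))
    (h2 : ∀ r ∈ (bs.map List.headI).dropLast, r + d < n)
    (h3 : ∀ r ∈ bs.map List.headI, r ≤ n) :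
    aStep d (PySem.List.enumerate bs 0) n = PySem.List.enumerate (bStep d bs n) 0 := by
  unfold aStep
  rw [assign_eq d n 0 bs h2 h3]
  cases bs with
  | nil => simp [bStep, PySem.List.enumerate_nil, PySem.List.enumerate_cons]
  | cons b rest =>
    simp only [ne_eq, reduceCtorEq, not_false_eq_true, true_and, bStep]
    by_cases hc : n - ((b :: rest).getLastD []).headI ≤ d
    · rw [if_pos hc, if_pos hc]
    · rw [if_neg hc, if_neg hc]
      rw [PySem.List.enumerate_append]
      simp [PySem.List.length_enumerate, PySem.List.enumerate_cons, PySem.List.enumerate_nil]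

lemma main_eq (d : Int) : ∀ (l : List Int) (bs : List (List Int)),
    l.Pairwise (· ≤ ·) →
    (∀ b ∈ bs, b ≠ []) →
    (∀ x ∈ l, ∀ r ∈ (bs.map List.headI).dropLast, r + d < x) →
    (∀ x ∈ l, ∀ r ∈ bs.map List.headI, r ≤ x) →
    l.foldl (aStep d) (PySem.List.enumerate bs 0) = PySem.List.enumerate (l.foldl (bStep d) bs) 0
  | [], bs, _, _, _, _ => rfl
  | n :: l', bs, hp, g1, h2, h3 => by
      have hple : ∀ x ∈ l', n ≤ x := fun x hx => (List.pairwise_cons.mp hp).1 x hx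
      have hp' : l'.Pairwise (· ≤ ·) := (List.pairwise_cons.mp hp).2
      simp only [List.foldl_cons]
      rw [step_eq d n bs (h2 n (by simp)) (h3 n (by simp))]
      -- establish the invariants for the new state
      have hg1' : ∀ b ∈ bStep d bs n, b ≠ [] := by
        intro b hb
        cases bs with
        | nil => simp [bStep] at hb; simp [hb]
        | cons c rest =>
          simp only [bStep] at hb
          by_cases hc : n - ((c :: rest).getLastD []).headI ≤ d
          · rw [if_pos hc] at hb
            rcases mem_bAppendLast hb with h | ⟨x, _, he⟩
            · exact g1 b h
            · simp [he]
          · rw [if_neg hc] at hb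
            rcases List.mem_append.mp hb with h | h
            · exact g1 b h
            · simp only [List.mem_singleton] at h; simp [h]
      refine main_eq d l' (bStep d bs n) hp' hg1' ?_ ?_
      · intro x hx r hr
        cases bs with
        | nil => simp [bStep] at hr
        | cons c rest =>
          simp only [bStep] at hr
          by_cases hc : n - ((c :: rest).getLastD []).headI ≤ d
          · rw [if_pos hc, reps_bAppendLast g1] at hr
            exact h2 x (by simp [hx]) r hr
          · rw [if_neg hc] at hr
            have hnx : n ≤ x := hple x hx
            have hmap : List.map List.headI ((c :: rest) ++ [[n]]) =
                List.map List.headI (c :: rest) ++ [([n] : List Int).headI] := by simp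
            rw [hmap, List.dropLast_concat] at hr
            have hr' : r ∈ (c :: rest).map List.headI := hr
            -- r is either a non-last old rep, or the old last rep (which failed the test)
            have hne : (c :: rest).map List.headI ≠ [] := by simp
            have hmem : r ∈ ((c :: rest).map List.headI).dropLast ++
                [((c :: rest).map List.headI).getLast hne] := by
              rw [List.dropLast_concat_getLast hne]; exact hr'
            rcases List.mem_append.mp hmem with hr2 | hr2
            · exact h2 x (by simp [hx]) r hr2
            · simp only [List.mem_singleton] at hr2
              rw [hr2, getLast_reps]
              omega
      · intro x hx r hr
        have hnx : n ≤ x := hple x hx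
        cases bs with
        | nil =>
          have hrn : r = n := by simpa [bStep] using hr
          omega
        | cons c rest =>
          simp only [bStep] at hr
          by_cases hc : n - ((c :: rest).getLastD []).headI ≤ d
          · rw [if_pos hc, reps_bAppendLast g1] at hr
            exact le_trans (h3 n (by simp) r hr) hnx
          · rw [if_neg hc] at hr
            simp only [List.map_append, List.map_cons, List.map_nil, List.mem_append,
              List.mem_singleton] at hr
            rcases hr with hr | hr
            · exact le_trans (h3 n (by simp) r hr) hnx
            · simp only [List.headI] at hr
              omega

-- ===== VERDICT (by name: the statement is the Claim_ definition above) =====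
theorem separate_numbers_into_buckets_spec : Claim_equal_separate_numbers_into_buckets := by
  intro numbers max_deviation _
  unfold Spec_separate_numbers_into_buckets separate_numbers_into_buckets separate_numbers_into_buckets_alt
  have hp : (PySem.List.sorted numbers (fun x => x) false).Pairwise (· ≤ ·) :=
    PySem.List.sorted_pairwise numbers (fun x => x)
  have := main_eq max_deviation (PySem.List.sorted numbers (fun x => x) false) []
    hp (by simp) (by simp) (by simp)
  simpa [PySem.List.enumerate_nil] using this
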